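-- pv_equiv track=rewrite | github.com/veerabadran28/sampleproject1 | main6.py | combine_and_match
-- ===== SOURCE A (Python) =====
-- def combine_and_match(tokens, columns):
--     combined_attributes = []
--     for i in range(len(tokens)):
--         for j in range(i + 1, len(tokens) + 1):
--             combined = ''.join(tokens[i:j]).lower()
--             if combined in columns:
--                 combined_attributes.append(combined)
--     return combined_attributes
-- ===== SOURCE B (Python) =====
-- def combine_and_match(tokens, columns):
--     cols = set(columns)
--     matches = []
--     for i in range(len(tokens)):
--         s = ''
--         for t in tokens[i:]:
--             s += t
--             c = s.lower()
--             if c in cols: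
--                 matches.append(c)
--     return matches
-- ===== Notes on version B (the rewrite author's own statement) =====
-- stated objective: faster
-- what changed: B precomputes a set of the columns and, for each start index, extends one running concatenation token by token instead of re-joining the slice tokens[i:j] for every pair (i,j) and scanning the columns list for membership.
import Mathlib
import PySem

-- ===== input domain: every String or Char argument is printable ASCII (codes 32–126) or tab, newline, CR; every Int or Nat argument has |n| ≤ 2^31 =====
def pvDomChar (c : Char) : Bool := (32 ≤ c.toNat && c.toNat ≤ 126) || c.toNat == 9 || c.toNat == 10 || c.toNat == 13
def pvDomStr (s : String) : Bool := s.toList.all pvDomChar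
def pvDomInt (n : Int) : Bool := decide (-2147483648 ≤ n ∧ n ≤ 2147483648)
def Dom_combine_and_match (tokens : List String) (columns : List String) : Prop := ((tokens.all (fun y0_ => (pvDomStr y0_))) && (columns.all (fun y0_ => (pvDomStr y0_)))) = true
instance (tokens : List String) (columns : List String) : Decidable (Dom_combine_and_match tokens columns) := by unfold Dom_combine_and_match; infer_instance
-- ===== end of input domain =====

-- B replaces A's per-pair slice-join and linear scan of `columns` by one incremental
-- concatenation per start index plus membership in a precomputed set (asymptotically faster).


-- ===== PORT A =====
def combine_and_match (tokens : List String) (columns : List String) : List String :=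
  (PySem.List.pyRange 0 (tokens.length : Int) 1).foldl
    (fun combined_attributes i =>
      (PySem.List.pyRange (i + 1) ((tokens.length : Int) + 1) 1).foldl
        (fun acc j =>
          let combined := PySem.Str.lower (PySem.Str.join "" (PySem.List.slice tokens (some i) (some j)))
          if columns.contains combined then acc ++ [combined] else acc)
        combined_attributes)
    []

-- ===== PORT B =====
def combine_and_match_alt (tokens : List String) (columns : List String) : List String :=
  let cols := PySem.Set.ofList columns
  (PySem.List.pyRange 0 (tokens.length : Int) 1).foldl
    (fun acc0 i =>
      ((PySem.List.slice tokens (some i) none).foldl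
        (fun (p : List String × String) t =>
          let s := p.2 ++ t
          let c := PySem.Str.lower s
          (if cols.contains c then p.1 ++ [c] else p.1, s))
        (acc0, "")).1)
    []

-- ===== PRECONDITION & SPEC =====
def Spec_combine_and_match (tokens : List String) (columns : List String) (out : List String) : Prop := out = combine_and_match_alt tokens columns
instance (tokens : List String) (columns : List String) (out : List String) : Decidable (Spec_combine_and_match tokens columns out) := by unfold Spec_combine_and_match; infer_instance

-- ===== CLAIM (what is proved, stated in full; the proofs are below) =====
def Claim_equal_combine_and_match : Prop := ∀ (tokens : List String) (columns : List String), Dom_combine_and_match tokens columns → Spec_combine_and_match tokens columns (combine_and_match tokens columns)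

-- ===== LEMMAS AND PROOFS =====

-- the running concatenations B builds from seed s over l: s++l0, s++l0++l1, …
def pvCum (s : String) (l : List String) : List String :=
  match l with
  | [] => []
  | t :: r => (s ++ t) :: pvCum (s ++ t) r

theorem pv_contains_ofList {α : Type} [BEq α] [LawfulBEq α] (xs : List α) (y : α) :
    (PySem.Set.ofList xs).contains y = xs.contains y := by
  rw [Bool.eq_iff_iff, PySem.Set.contains_iff, PySem.Set.mem_ofList, List.contains_iff_mem]

-- ''.join at the string level is right-fold concatenation
theorem pv_intercalate_nil {α : Type} (L : List (List α)) : List.intercalate [] L = L.flatten := by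
  induction L with
  | nil => rfl
  | cons a t ih => cases t <;> simp_all [List.intercalate]

theorem pv_join_nil_cons (x : String) (l : List String) :
    PySem.Str.join "" (x :: l) = x ++ PySem.Str.join "" l := by
  apply String.toList_inj.mp
  simp [PySem.Str.toList_join, PySem.Chars.join, pv_intercalate_nil]

theorem pv_join_empty : PySem.Str.join "" ([] : List String) = "" := by
  apply String.toList_inj.mp
  simp [PySem.Str.toList_join, PySem.Chars.join, List.intercalate]

-- B's inner fold, projected to its first component, is a fold over pvCum
theorem pv_b_inner (cols : PySem.Set String) (l : List String) (s : String) (acc : List String) :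
    (l.foldl
      (fun (p : List String × String) t =>
        (if cols.contains (PySem.Str.lower (p.2 ++ t)) then p.1 ++ [PySem.Str.lower (p.2 ++ t)] else p.1, p.2 ++ t))
      (acc, s)).1
    = (pvCum s l).foldl
        (fun acc c => if cols.contains (PySem.Str.lower c) then acc ++ [PySem.Str.lower c] else acc) acc := by
  induction l generalizing s acc with
  | nil => rfl
  | cons t r ih =>
      simp only [List.foldl_cons, pvCum]
      exact ih _ _

-- pvCum as a closed form: the joins of the nonempty prefixes
theorem pv_cum_eq (l : List String) (s : String) :
    pvCum s l = (List.range l.length).map (fun t => s ++ PySem.Str.join "" (l.take (t + 1))) := by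
  induction l generalizing s with
  | nil => rfl
  | cons x r ih =>
      simp only [pvCum, List.length_cons, List.range_succ_eq_map, List.map_cons, List.map_map]
      refine List.cons_eq_cons.mpr ⟨?_, ?_⟩
      · simp [pv_join_nil_cons, pv_join_empty]
      · rw [ih (s ++ x)]
        apply List.map_congr_left
        intro t _
        simp [pv_join_nil_cons, String.append_assoc]

-- A's candidate list for start index k is pvCum "" of the suffix
theorem pv_cands (tokens : List String) (k : Nat) (hk : k ≤ tokens.length) :
    (PySem.List.pyRange ((k : Int) + 1) ((tokens.length : Int) + 1) 1).map
      (fun j => PySem.Str.join "" (PySem.List.slice tokens (some (k : Int)) (some j)))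
    = pvCum "" (tokens.drop k) := by
  rw [PySem.List.pyRange_one, List.map_map, pv_cum_eq]
  have hlen : ((tokens.length : Int) + 1 - ((k : Int) + 1)).toNat = (tokens.drop k).length := by
    simp only [List.length_drop]; omega
  rw [hlen]
  apply List.map_congr_left
  intro t _
  have : (k : Int) + 1 + (t : Int) = ((k + 1 + t : Nat) : Int) := by push_cast; ring
  rw [Function.comp_apply, this, PySem.List.slice_natCast]
  have h2 : k + 1 + t - k = t + 1 := by omega
  rw [h2]
  simp

-- ===== VERDICT (by name: the statement is the Claim_ definition above) =====
theorem combine_and_match_spec : Claim_equal_combine_and_match := by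
  intro tokens columns _
  unfold Spec_combine_and_match combine_and_match combine_and_match_alt
  apply Eq.symm
  apply PySem.List.foldl_congr_mem
  intro acc i hi
  rw [PySem.List.mem_pyRange_one] at hi
  obtain ⟨h0, hlt⟩ := hi
  obtain ⟨k, rfl⟩ : ∃ k : Nat, i = (k : Int) := ⟨i.toNat, (Int.toNat_of_nonneg h0).symm⟩
  have hk : k ≤ tokens.length := by exact_mod_cast le_of_lt hlt
  rw [PySem.List.slice_from tokens (by positivity), Int.toNat_natCast]
  simp only []
  rw [pv_b_inner, ← pv_cands tokens k hk]
  rw [List.foldl_map]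
  apply PySem.List.foldl_congr_mem
  intro a j _
  rw [pv_contains_ofList]
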